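-- pv_equiv track=rewrite | github.com/patda9/th-qa-system-261491 | src/positive_generator.py | track_answer
-- ===== SOURCE A (Python) =====
-- def track_answer(answer_detail, document):
--     answer_masks = []
--     tokens_range = []
--
--     counter = 0
--     end = 0
--     start = 0
--     for tk in document:
--         end += len(tk)
--         characters_index = (start, end)
--
--         ans_begin = answer_detail['answer_begin_position ']
--         ans_end = answer_detail['answer_end_position']
--         if(ans_begin - 1 in range(start, end) or ans_end - 1 in range(start, end)):
--             answer_masks.append(1)
--         else:
--             answer_masks.append(0)
--
--         counter += 1
--         start = end
--
--         tokens_range.append(characters_index)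
--
--     return answer_masks, tokens_range
-- ===== SOURCE B (Python) =====
-- def track_answer(answer_detail, document):
--     # One pass of cumulative sums gives the token ranges; the (at most two)
--     # marked positions are then located by binary search instead of testing
--     # every token's range against both positions.
--     ends = []
--     total = 0
--     for tk in document:
--         total += len(tk)
--         ends.append(total)
--     tokens_range = list(zip([0] + ends[:-1], ends))
--     answer_masks = [0] * len(document)
--     if document:
--         for p in (answer_detail['answer_begin_position '] - 1,
--                   answer_detail['answer_end_position'] - 1):
--             if 0 <= p < total:
--                 lo, hi = 0, len(ends)
--                 while lo < hi:  # bisect_right by hand: first index with ends[i] > p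
--                     mid = (lo + hi) // 2
--                     if ends[mid] <= p:
--                         lo = mid + 1
--                     else:
--                         hi = mid
--                 answer_masks[lo] = 1
--     return answer_masks, tokens_range
-- ===== Notes on version B (the rewrite author's own statement) =====
-- stated objective: alternative
-- what changed: Instead of testing both answer positions against every token's range inside the loop, B builds the ranges from one cumulative-sum pass, starts from an all-zero mask list, and locates the (at most two) marked tokens by a hand-written binary search over the cumulative end offsets.
import Mathlib
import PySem

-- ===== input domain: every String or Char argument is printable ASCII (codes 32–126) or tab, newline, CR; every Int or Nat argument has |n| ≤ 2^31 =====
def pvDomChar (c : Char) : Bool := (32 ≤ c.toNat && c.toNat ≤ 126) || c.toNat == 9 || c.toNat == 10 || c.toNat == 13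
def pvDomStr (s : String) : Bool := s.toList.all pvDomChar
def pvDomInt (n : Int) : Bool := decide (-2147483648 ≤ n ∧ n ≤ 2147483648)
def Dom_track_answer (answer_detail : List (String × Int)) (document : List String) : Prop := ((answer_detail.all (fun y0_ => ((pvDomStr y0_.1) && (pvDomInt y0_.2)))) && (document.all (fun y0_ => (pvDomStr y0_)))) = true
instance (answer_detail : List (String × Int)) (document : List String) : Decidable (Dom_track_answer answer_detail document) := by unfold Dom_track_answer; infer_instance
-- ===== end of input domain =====

-- B replaces A's per-token range-membership tests by cumulative sums plus a binary
-- search for the (at most two) marked positions: simpler work per token, same values.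


-- ===== PORT A =====
-- loop body of A's 'for tk in document'; state = (answer_masks, tokens_range, counter, start, end)
def trackStepA (answer_detail : List (String × Int))
    (st : List Int × List (Int × Int) × Int × Int × Int) (tk : String) :
    List Int × List (Int × Int) × Int × Int × Int :=
  let masks := st.1
  let ranges := st.2.1
  let counter := st.2.2.1
  let start := st.2.2.2.1
  let e := st.2.2.2.2 + PySem.Str.len tk
  let characters_index := (start, e)
  -- the dict reads raise KeyError when a key is missing: Pre_ excludes that (getD value then irrelevant)
  let ans_begin := (answer_detail.lookup "answer_begin_position ").getD 0
  let ans_end := (answer_detail.lookup "answer_end_position").getD 0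
  -- 'x in range(start, end)' (step 1) is exactly start ≤ x ∧ x < end
  let masks := if (start ≤ ans_begin - 1 ∧ ans_begin - 1 < e) ∨ (start ≤ ans_end - 1 ∧ ans_end - 1 < e)
    then masks ++ [1] else masks ++ [0]
  (masks, ranges ++ [characters_index], counter + 1, e, e)

def track_answer (answer_detail : List (String × Int)) (document : List String) : List Int × (List (Int × Int)) :=
  let st := document.foldl (trackStepA answer_detail) ([], [], 0, 0, 0)
  (st.1, st.2.1)

-- ===== PORT B =====
-- Source B's first loop: state = (ends, total)
def trackStepEnds (st : List Int × Int) (tk : String) : List Int × Int :=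
  let total := st.2 + PySem.Str.len tk
  (st.1 ++ [total], total)

-- Source B's hand-written while-loop binary search (first index with ends[i] > p)
def bisectEnds (ends : List Int) (p : Int) (lo hi : Nat) : Nat :=
  if lo < hi then
    let mid := (lo + hi) / 2
    if ends.getD mid 0 ≤ p then bisectEnds ends p (mid + 1) hi
    else bisectEnds ends p lo mid
  else lo
termination_by hi - lo
decreasing_by all_goals omega

-- Source B's second loop body: conditionally mark the token containing position p
def trackStepMark (ends : List Int) (total : Int) (m : List Int) (p : Int) : List Int :=
  if 0 ≤ p ∧ p < total then m.set (bisectEnds ends p 0 ends.length) 1 else m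

def track_answer_alt (answer_detail : List (String × Int)) (document : List String) : List Int × (List (Int × Int)) :=
  let acc := document.foldl trackStepEnds ([], 0)
  let ends := acc.1
  let total := acc.2
  let tokens_range := List.zip (0 :: ends.dropLast) ends
  let answer_masks : List Int := List.replicate document.length 0
  let answer_masks :=
    if document = [] then answer_masks
    else
      [(answer_detail.lookup "answer_begin_position ").getD 0 - 1,
       (answer_detail.lookup "answer_end_position").getD 0 - 1].foldl
        (trackStepMark ends total) answer_masks
  (answer_masks, tokens_range)

-- ===== PRECONDITION & SPEC =====
-- A reads the two dict keys inside the loop, so it raises KeyError exactly when the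
-- document is nonempty and one of the keys is missing; Pre_ excludes exactly those
-- inputs, and A returns normally on every input Pre_ admits.
def Pre_track_answer (answer_detail : List (String × Int)) (document : List String) : Prop :=
  document = [] ∨
    ((answer_detail.lookup "answer_begin_position ").isSome ∧
     (answer_detail.lookup "answer_end_position").isSome)
instance (answer_detail : List (String × Int)) (document : List String) : Decidable (Pre_track_answer answer_detail document) := by unfold Pre_track_answer; infer_instance

def pvWitness_track_answer : (List (String × Int)) × List String :=
  ([("answer_begin_position ", 3), ("answer_end_position", 5)], ["ab", "", "cde"])

def Spec_track_answer (answer_detail : List (String × Int)) (document : List String) (out : List Int × (List (Int × Int))) : Prop := out = track_answer_alt answer_detail document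
instance (answer_detail : List (String × Int)) (document : List String) (out : List Int × (List (Int × Int))) : Decidable (Spec_track_answer answer_detail document out) := by unfold Spec_track_answer; infer_instance

-- ===== CLAIM (what is proved, stated in full; the proofs are below) =====
def Claim_equal_track_answer : Prop := ∀ (answer_detail : List (String × Int)) (document : List String), Dom_track_answer answer_detail document → Pre_track_answer answer_detail document → Spec_track_answer answer_detail document (track_answer answer_detail document)

-- ===== LEMMAS AND PROOFS =====

-- the list of per-token character ranges starting at offset s, over the token lengths L
def rspec (s : Int) : List Int → List (Int × Int)
  | [] => []
  | l :: ls => (s, s + l) :: rspec (s + l) ls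

-- the mask A records for a range r, given the two (already shifted) positions
def maskOf (p1 p2 : Int) (r : Int × Int) : Int :=
  if (r.1 ≤ p1 ∧ p1 < r.2) ∨ (r.1 ≤ p2 ∧ p2 < r.2) then 1 else 0

theorem rspec_length (L : List Int) (s : Int) : (rspec s L).length = L.length := by
  induction L generalizing s with
  | nil => rfl
  | cons l ls ih => simp [rspec, ih]

theorem rspec_get (L : List Int) (s : Int) (i : Nat) (h : i < L.length) :
    (rspec s L)[i]'(by rw [rspec_length]; exact h) =
      (s + (L.take i).sum, s + (L.take (i + 1)).sum) := by
  induction L generalizing s i with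
  | nil => simp at h
  | cons l ls ih =>
    cases i with
    | zero => simp [rspec]
    | succ j =>
      have := ih (s + l) j (by simpa using h)
      simp [rspec, this, add_assoc]

-- A's fold, from a generalized state with start = end = s
theorem foldA_eq (answer_detail : List (String × Int)) (document : List String)
    (ms : List Int) (rs : List (Int × Int)) (c s : Int) :
    document.foldl (trackStepA answer_detail) (ms, rs, c, s, s) =
      (ms ++ (rspec s (document.map PySem.Str.len)).map
          (maskOf ((answer_detail.lookup "answer_begin_position ").getD 0 - 1)
                  ((answer_detail.lookup "answer_end_position").getD 0 - 1)),
       rs ++ rspec s (document.map PySem.Str.len),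
       c + document.length,
       s + (document.map PySem.Str.len).sum,
       s + (document.map PySem.Str.len).sum) := by
  induction document generalizing ms rs c s with
  | nil => simp [rspec]
  | cons tk rest ih =>
    simp only [List.foldl_cons, List.map_cons, rspec, trackStepA]
    rw [ih]
    simp only [Prod.mk.injEq, List.length_cons, List.sum_cons]
    refine ⟨?_, by simp, by push_cast; ring, by ring, by ring⟩
    simp only [maskOf]
    split <;> simp_all

-- B's ends fold, generalized
theorem foldEnds_eq (document : List String) (es : List Int) (t : Int) :
    document.foldl trackStepEnds (es, t) =
      (es ++ (rspec t (document.map PySem.Str.len)).map Prod.snd,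
       t + (document.map PySem.Str.len).sum) := by
  induction document generalizing es t with
  | nil => simp [rspec]
  | cons tk rest ih =>
    simp only [List.foldl_cons, List.map_cons, rspec, trackStepEnds]
    rw [ih]
    simp [add_assoc]

-- zipping 0 :: dropLast ends with ends rebuilds the ranges
theorem zip_rspec (L : List Int) (s : Int) :
    List.zip (s :: ((rspec s L).map Prod.snd).dropLast) ((rspec s L).map Prod.snd) =
      rspec s L := by
  induction L generalizing s with
  | nil => simp [rspec]
  | cons l ls ih =>
    cases ls with
    | nil => simp [rspec]
    | cons l2 ls2 =>
      have := ih (s + l)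
      simp only [rspec, List.map_cons] at this ⊢
      rw [List.dropLast_cons_of_ne_nil (by simp)]
      simpa [List.zip] using congrArg (List.cons (s, s + l)) this

theorem take_sum_nonneg (L : List Int) (hL : ∀ x ∈ L, 0 ≤ x) (k : Nat) :
    0 ≤ (L.take k).sum :=
  List.sum_nonneg (fun x hx => hL x (List.mem_of_mem_take hx))

theorem take_sum_mono (L : List Int) (hL : ∀ x ∈ L, 0 ≤ x) {j k : Nat} (h : j ≤ k) :
    (L.take j).sum ≤ (L.take k).sum := by
  have hd : 0 ≤ ((L.take k).drop j).sum := by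
    apply List.sum_nonneg
    intro x hx
    exact hL x (List.mem_of_mem_take (List.mem_of_mem_drop hx))
  calc (L.take j).sum ≤ (L.take j).sum + ((L.take k).drop j).sum := by omega
    _ = ((L.take k).take j ++ (L.take k).drop j).sum := by
        rw [List.sum_append, List.take_take, Nat.min_eq_left h]
    _ = (L.take k).sum := by rw [List.take_append_drop]

-- fuel-indexed correctness of the hand-written binary search
theorem bisect_aux (ends : List Int) (p : Int)
    (hsorted : ∀ i j : Nat, i ≤ j → j < ends.length → ends.getD i 0 ≤ ends.getD j 0) :
    ∀ fuel lo hi : Nat, hi - lo ≤ fuel → lo ≤ hi → hi ≤ ends.length →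
      (∀ j : Nat, j < lo → ends.getD j 0 ≤ p) →
      (∀ j : Nat, hi ≤ j → j < ends.length → p < ends.getD j 0) →
      lo ≤ bisectEnds ends p lo hi ∧ bisectEnds ends p lo hi ≤ hi ∧
      (∀ j : Nat, j < bisectEnds ends p lo hi → ends.getD j 0 ≤ p) ∧
      (∀ j : Nat, bisectEnds ends p lo hi ≤ j → j < ends.length → p < ends.getD j 0) := by
  intro fuel
  induction fuel with
  | zero =>
    intro lo hi hf hlh hhn hlo hhi
    have : lo = hi := by omega
    subst this
    rw [bisectEnds]
    simp only [lt_irrefl, if_false]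
    exact ⟨le_refl _, le_refl _, hlo, hhi⟩
  | succ f ih =>
    intro lo hi hf hlh hhn hlo hhi
    rw [bisectEnds]
    by_cases hlt : lo < hi
    · simp only [hlt, if_true]
      set mid := (lo + hi) / 2 with hmid
      have hmlo : lo ≤ mid := by omega
      have hmhi : mid < hi := by omega
      by_cases hle : ends.getD mid 0 ≤ p
      · simp only [hle, if_true]
        refine (ih (mid + 1) hi (by omega) (by omega) hhn ?_ hhi).imp (by omega) id
        intro j hj
        exact le_trans (hsorted j mid (by omega) (by omega)) hle
      · simp only [hle, if_false]
        refine (ih lo mid (by omega) (by omega) (by omega) hlo ?_).imp id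
          (fun h => ⟨by omega, h.2⟩)
        intro j hjm hjn
        exact lt_of_lt_of_le (by omega) (hsorted mid j hjm hjn)
    · simp only [hlt, if_false]
      have : lo = hi := by omega
      subst this
      exact ⟨le_refl _, le_refl _, hlo, hhi⟩

-- the ends list is sorted (entries are prefix sums of nonnegative lengths)
theorem ends_getD (L : List Int) (i : Nat) (hi : i < L.length) :
    ((rspec 0 L).map Prod.snd).getD i 0 = (L.take (i + 1)).sum := by
  have hlen : i < ((rspec 0 L).map Prod.snd).length := by
    rw [List.length_map, rspec_length]; exact hi
  rw [List.getD_eq_getElem _ _ hlen, List.getElem_map, rspec_get L 0 i hi]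
  simp

theorem ends_sorted (L : List Int) (hL : ∀ x ∈ L, 0 ≤ x) :
    ∀ i j : Nat, i ≤ j → j < ((rspec 0 L).map Prod.snd).length →
      ((rspec 0 L).map Prod.snd).getD i 0 ≤ ((rspec 0 L).map Prod.snd).getD j 0 := by
  intro i j hij hj
  rw [List.length_map, rspec_length] at hj
  rw [ends_getD L i (by omega), ends_getD L j hj]
  exact take_sum_mono L hL (by omega)

-- a position p lies in token i's range iff p is in [0, total) and the binary search finds i
theorem contain_iff (L : List Int) (hL : ∀ x ∈ L, 0 ≤ x) (p : Int) (i : Nat)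
    (hi : i < L.length) :
    ((L.take i).sum ≤ p ∧ p < (L.take (i + 1)).sum) ↔
      (0 ≤ p ∧ p < L.sum ∧
        bisectEnds ((rspec 0 L).map Prod.snd) p 0 ((rspec 0 L).map Prod.snd).length = i) := by
  have hlenE : ((rspec 0 L).map Prod.snd).length = L.length := by
    rw [List.length_map, rspec_length]
  have hsorted := ends_sorted L hL
  have hspec := bisect_aux ((rspec 0 L).map Prod.snd) p hsorted
    ((rspec 0 L).map Prod.snd).length 0 ((rspec 0 L).map Prod.snd).length
    (by omega) (by omega) (le_refl _) (by omega) (by intro j hj hj2; omega)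
  set r := bisectEnds ((rspec 0 L).map Prod.snd) p 0 ((rspec 0 L).map Prod.snd).length with hr
  obtain ⟨-, hrle, hleft, hright⟩ := hspec
  rw [hlenE] at hrle
  have hsum : (L.take L.length).sum = L.sum := by rw [List.take_length]
  constructor
  · rintro ⟨h1, h2⟩
    have h0p : 0 ≤ p := le_trans (take_sum_nonneg L hL i) h1
    have hptot : p < L.sum := by
      have := take_sum_mono L hL (show i + 1 ≤ L.length by omega)
      rw [hsum] at this; omega
    refine ⟨h0p, hptot, ?_⟩
    by_contra hne
    rcases Nat.lt_or_ge r i with hlt | hge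
    · -- r < i: then p < ends[r] ≤ ends[i-1] = take i sum ≤ p
      have hri : p < ((rspec 0 L).map Prod.snd).getD r 0 :=
        hright r (le_refl _) (by omega)
      rw [ends_getD L r (by omega)] at hri
      have : (L.take (r + 1)).sum ≤ (L.take i).sum := take_sum_mono L hL (by omega)
      omega
    · have hgt : i < r := by omega
      have := hleft i hgt
      rw [ends_getD L i hi] at this
      omega
  · rintro ⟨h0p, hptot, hreq⟩
    subst hreq
    constructor
    · cases Nat.eq_zero_or_pos r with
      | inl h0 => rw [h0]; simpa using h0p
      | inr hpos =>
        have := hleft (r - 1) (by omega)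
        rw [ends_getD L (r - 1) (by omega)] at this
        have heq : r - 1 + 1 = r := by omega
        rw [heq] at this
        exact this
    · have := hright r (le_refl _) (by omega)
      rw [ends_getD L r (by omega)] at this
      exact this

-- the mask list B builds (replicate + two conditional sets) equals A's mapped masks
theorem masks_eq (L : List Int) (hL : ∀ x ∈ L, 0 ≤ x) (p1 p2 : Int) :
    [p1, p2].foldl
        (trackStepMark ((rspec 0 L).map Prod.snd) L.sum)
        (List.replicate L.length (0 : Int)) =
      (rspec 0 L).map (maskOf p1 p2) := by
  set E := (rspec 0 L).map Prod.snd with hE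
  apply List.ext_getElem
  · simp only [List.foldl_cons, List.foldl_nil, trackStepMark]
    split <;> split <;> simp [rspec_length]
  · intro i hi1 hi2
    have hiL : i < L.length := by
      simpa [List.length_map, rspec_length] using hi2
    have key : ∀ p : Int,
        ((L.take i).sum ≤ p ∧ p < (L.take (i + 1)).sum) ↔
          (0 ≤ p ∧ p < L.sum ∧ bisectEnds E p 0 E.length = i) := fun p =>
      contain_iff L hL p i hiL
    rw [List.getElem_map, rspec_get L 0 i hiL]
    simp only [maskOf, zero_add]
    by_cases h2 : 0 ≤ p2 ∧ p2 < L.sum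
    · by_cases hb2 : bisectEnds E p2 0 E.length = i
      · have hc2 : (L.take i).sum ≤ p2 ∧ p2 < (L.take (i + 1)).sum :=
          (key p2).mpr ⟨h2.1, h2.2, hb2⟩
        simp [trackStepMark, h2, hb2, hc2]
      · have hc2 : ¬ ((L.take i).sum ≤ p2 ∧ p2 < (L.take (i + 1)).sum) := by
          intro hc; exact hb2 ((key p2).mp hc).2.2
        by_cases h1 : 0 ≤ p1 ∧ p1 < L.sum
        · by_cases hb1 : bisectEnds E p1 0 E.length = i
          · have hc1 : (L.take i).sum ≤ p1 ∧ p1 < (L.take (i + 1)).sum :=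
              (key p1).mpr ⟨h1.1, h1.2, hb1⟩
            simp [trackStepMark, h2, hb2, h1, hb1, hc1]
          · have hc1 : ¬ ((L.take i).sum ≤ p1 ∧ p1 < (L.take (i + 1)).sum) := by
              intro hc; exact hb1 ((key p1).mp hc).2.2
            simp [trackStepMark, h2, hb2, hc2, h1, hb1, hc1]
        · have hc1 : ¬ ((L.take i).sum ≤ p1 ∧ p1 < (L.take (i + 1)).sum) := by
            intro hc
            have h0 := le_trans (take_sum_nonneg L hL i) hc.1
            have hmono := take_sum_mono L hL (show i + 1 ≤ L.length by omega)
            rw [List.take_length] at hmono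
            exact h1 ⟨h0, by omega⟩
          simp [trackStepMark, h2, hb2, hc2, h1, hc1]
    · have hc2 : ¬ ((L.take i).sum ≤ p2 ∧ p2 < (L.take (i + 1)).sum) := by
        intro hc
        have h0 := le_trans (take_sum_nonneg L hL i) hc.1
        have hmono := take_sum_mono L hL (show i + 1 ≤ L.length by omega)
        rw [List.take_length] at hmono
        exact h2 ⟨h0, by omega⟩
      by_cases h1 : 0 ≤ p1 ∧ p1 < L.sum
      · by_cases hb1 : bisectEnds E p1 0 E.length = i
        · have hc1 : (L.take i).sum ≤ p1 ∧ p1 < (L.take (i + 1)).sum :=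
            (key p1).mpr ⟨h1.1, h1.2, hb1⟩
          simp [trackStepMark, h2, h1, hb1, hc1]
        · have hc1 : ¬ ((L.take i).sum ≤ p1 ∧ p1 < (L.take (i + 1)).sum) := by
            intro hc; exact hb1 ((key p1).mp hc).2.2
          simp [trackStepMark, h2, hc2, h1, hb1, hc1]
      · have hc1 : ¬ ((L.take i).sum ≤ p1 ∧ p1 < (L.take (i + 1)).sum) := by
          intro hc
          have h0 := le_trans (take_sum_nonneg L hL i) hc.1
          have hmono := take_sum_mono L hL (show i + 1 ≤ L.length by omega)
          rw [List.take_length] at hmono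
          exact h1 ⟨h0, by omega⟩
        simp [trackStepMark, h2, hc2, h1, hc1]

theorem len_nonneg (document : List String) :
    ∀ x ∈ document.map PySem.Str.len, 0 ≤ x := by
  intro x hx
  obtain ⟨s, -, rfl⟩ := List.mem_map.mp hx
  rw [PySem.Str.len_eq]
  exact Int.natCast_nonneg _

-- ===== VERDICT (by name: the statement is the Claim_ definition above) =====
theorem track_answer_spec : Claim_equal_track_answer := by
  intro answer_detail document _ _
  unfold Spec_track_answer track_answer track_answer_alt
  cases hdoc : document with
  | nil => simp
  | cons tk rest =>
    rw [← hdoc]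
    have hne : document ≠ [] := by rw [hdoc]; simp
    set L := document.map PySem.Str.len with hLdef
    have hL := len_nonneg document
    rw [foldA_eq, foldEnds_eq]
    simp only [List.nil_append, zero_add, if_neg hne, Prod.mk.injEq]
    refine ⟨?_, ?_⟩
    · have hlen : document.length = L.length := by rw [hLdef, List.length_map]
      rw [hlen]
      exact (masks_eq L hL _ _).symm
    · exact (zip_rspec L 0).symm
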